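-- pv_equiv track=rewrite | github.com/CVRS-Hamlyn/GA-SA-RBF | layers.py | compute_num_bridgenet
-- ===== SOURCE A (Python) =====
-- def compute_num_bridgenet(num_layers):
--     num_node = 1
--     nodes_layers = {}
--     nodes_layers[0] = num_node
--     for i in range(num_layers):
--         num_node = 3 + 2*(num_node - 1)
--         nodes_layers[i+1] = num_node
--
--     return nodes_layers
-- ===== SOURCE B (Python) =====
-- def compute_num_bridgenet(num_layers):
--     # Closed form: layer i holds (1 << (i + 1)) - 1 nodes (the recurrence doubles-plus-one from 1).
--     return {i: (1 << (i + 1)) - 1 for i in range(max(num_layers, 0) + 1)}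
-- ===== Notes on version B (the rewrite author's own statement) =====
-- stated objective: simpler
-- what changed: Replaces the loop that threads the previous layer's count through an accumulator by a one-line dict comprehension computing each layer's count independently from the closed-form shift formula.
import Mathlib
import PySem

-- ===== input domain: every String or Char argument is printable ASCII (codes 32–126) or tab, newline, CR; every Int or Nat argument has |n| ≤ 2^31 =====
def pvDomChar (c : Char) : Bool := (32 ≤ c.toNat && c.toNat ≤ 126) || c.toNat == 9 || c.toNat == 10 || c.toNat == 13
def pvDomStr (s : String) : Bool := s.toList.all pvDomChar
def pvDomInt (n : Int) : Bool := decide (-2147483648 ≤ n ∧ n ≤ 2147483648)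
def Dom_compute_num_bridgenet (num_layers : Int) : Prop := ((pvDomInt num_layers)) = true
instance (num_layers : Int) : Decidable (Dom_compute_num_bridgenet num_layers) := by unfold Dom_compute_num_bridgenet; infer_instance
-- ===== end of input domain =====

-- B replaces A's accumulating loop by a dict comprehension from the closed form 2^(i+1)-1 (objective: simpler).

-- ===== PORT A =====
-- literal transliteration: num_node accumulator and an insertion-ordered dict, loop over range(num_layers)
def compute_num_bridgenet (num_layers : Int) : List (Int × Int) :=
  let num_node : Int := 1
  let nodes_layers : PySem.Dict Int Int := PySem.Dict.empty
  let nodes_layers := nodes_layers.insert 0 num_node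
  let st := (PySem.List.pyRange 0 num_layers 1).foldl
    (fun (st : Int × PySem.Dict Int Int) i =>
      let num_node := 3 + 2 * (st.1 - 1)
      (num_node, st.2.insert (i + 1) num_node))
    (num_node, nodes_layers)
  st.2.items

-- ===== PORT B =====
-- dict comprehension {i: (1 << (i+1)) - 1 for i in range(max(num_layers,0)+1)}; keys are fresh and increasing
def compute_num_bridgenet_alt (num_layers : Int) : List (Int × Int) :=
  (PySem.List.pyRange 0 (max num_layers 0 + 1) 1).map (fun i => (i, (1 : Int) <<< (i + 1).toNat - 1))

-- ===== PRECONDITION & SPEC =====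
def Spec_compute_num_bridgenet (num_layers : Int) (out : List (Int × Int)) : Prop := out = compute_num_bridgenet_alt num_layers
instance (num_layers : Int) (out : List (Int × Int)) : Decidable (Spec_compute_num_bridgenet num_layers out) := by unfold Spec_compute_num_bridgenet; infer_instance

-- ===== CLAIM (what is proved, stated in full; the proofs are below) =====
def Claim_equal_compute_num_bridgenet : Prop := ∀ (num_layers : Int), Dom_compute_num_bridgenet num_layers → Spec_compute_num_bridgenet num_layers (compute_num_bridgenet num_layers)

-- ===== LEMMAS AND PROOFS =====

def pvStepA (st : Int × PySem.Dict Int Int) (i : Int) : Int × PySem.Dict Int Int :=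
  let num_node := 3 + 2 * (st.1 - 1)
  (num_node, st.2.insert (i + 1) num_node)

def pvRow (i : Nat) : Int × Int := ((i : Int), 2 ^ (i + 1) - 1)

lemma pvLoopA (n : Nat) :
    (PySem.List.pyRange 0 (n : Int) 1).foldl pvStepA (1, PySem.Dict.empty.insert 0 1)
      = (2 ^ (n + 1) - 1, PySem.Dict.mk ((List.range (n + 1)).map pvRow)) := by
  induction n with
  | zero =>
      simp [PySem.List.pyRange_one_eq_nil, pvRow]
      rfl
  | succ n ih =>
      have hsplit : PySem.List.pyRange 0 ((n : Int) + 1) 1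
          = PySem.List.pyRange 0 (n : Int) 1 ++ [(n : Int)] :=
        PySem.List.pyRange_one_succ_right (by positivity)
      have : ((n : Int) + 1 : Int) = ((n + 1 : Nat) : Int) := by push_cast; ring
      rw [← this] at *
      rw [hsplit, List.foldl_append, ih]
      have hfresh : (PySem.Dict.mk ((List.range (n + 1)).map pvRow)).contains ((n : Int) + 1) = false := by
        simp only [PySem.Dict.contains_mk, List.any_map, List.any_eq_false]
        intro k hk
        have hk' : k < n + 1 := List.mem_range.mp hk
        simp only [Function.comp, pvRow]
        intro h
        have h2 : (k : Int) = (n : Int) + 1 := by exact_mod_cast eq_of_beq h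
        omega
      have hval : 3 + 2 * ((2 ^ (n + 1) - 1 : Int) - 1) = 2 ^ (n + 1 + 1) - 1 := by
        rw [pow_succ]
        ring
      show (3 + 2 * ((2 ^ (n + 1) - 1 : Int) - 1),
            (PySem.Dict.mk ((List.range (n + 1)).map pvRow)).insert ((n : Int) + 1)
              (3 + 2 * ((2 ^ (n + 1) - 1 : Int) - 1))) = _
      rw [hval]
      refine Prod.ext rfl ?_
      apply PySem.Dict.ext
      rw [PySem.Dict.items_insert_of_not_contains _ _ hfresh]
      simp [List.range_succ, pvRow]

lemma pvRangeA (n : Int) : PySem.List.pyRange 0 n 1 = PySem.List.pyRange 0 (n.toNat : Int) 1 := by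
  rcases le_or_gt 0 n with h | h
  · rw [Int.toNat_of_nonneg h]
  · rw [PySem.List.pyRange_one_eq_nil (by omega), PySem.List.pyRange_one_eq_nil (by omega)]

-- ===== VERDICT (by name: the statement is the Claim_ definition above) =====
theorem compute_num_bridgenet_spec : Claim_equal_compute_num_bridgenet := by
  intro n _
  show compute_num_bridgenet n = compute_num_bridgenet_alt n
  unfold compute_num_bridgenet compute_num_bridgenet_alt
  have hmax : max n 0 = (n.toNat : Int) := (Int.ofNat_toNat n).symm
  rw [pvRangeA n]
  show ((PySem.List.pyRange 0 (n.toNat : Int) 1).foldl pvStepA (1, PySem.Dict.empty.insert 0 1)).2.items = _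
  rw [pvLoopA n.toNat]
  have hb : max n 0 + 1 = ((n.toNat + 1 : Nat) : Int) := by
    rw [hmax]; push_cast; ring
  rw [hb, PySem.List.pyRange_zero_natCast]
  simp only [List.map_map]
  apply List.map_congr_left
  intro k hk
  have hk' : k < n.toNat + 1 := List.mem_range.mp hk
  simp only [Function.comp, pvRow]
  simp [Int.shiftLeft_eq]
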